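-- pv_equiv track=rewrite | github.com/counter-measure/settlement-eta-api | archive/count_objects.py | count_objects
-- ===== SOURCE A (Python) =====
-- from typing import Dict
--
-- def count_objects(data: Dict) -> Dict:
--     """
--     Count objects at each level of the JSON structure.
--
--     Returns a dict with counts for each level.
--     """
--     counts = {
--         'origin_chain_ids': 0,
--         'destination_chain_ids': 0,
--         'tickerhashes': 0,
--         'bins': 0,
--         'total_combinations': 0
--     }
--
--     for origin_chain_id, destinations in data.items():
--         counts['origin_chain_ids'] += 1
--
--         for destination_chain_id, tickerhashes in destinations.items():
--             counts['destination_chain_ids'] += 1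
--
--             for tickerhash, bins in tickerhashes.items():
--                 counts['tickerhashes'] += 1
--
--                 for bin_name, bin_data in bins.items():
--                     counts['bins'] += 1
--
--     # Calculate total unique combinations
--     counts['total_combinations'] = counts['tickerhashes']
--
--     return counts
-- ===== SOURCE B (Python) =====
-- def count_objects(data):
--     """
--     Count objects at each level of the JSON structure.
--
--     Returns a dict with counts for each level.
--     """
--     origin = len(data)
--     destination = sum(len(dest) for dest in data.values())
--     tickerhashes = sum(len(th) for dest in data.values() for th in dest.values())
--     bins = sum(len(b) for dest in data.values() for th in dest.values() for b in th.values())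
--     return {
--         'origin_chain_ids': origin,
--         'destination_chain_ids': destination,
--         'tickerhashes': tickerhashes,
--         'bins': bins,
--         'total_combinations': tickerhashes,
--     }
-- ===== Notes on version B (the rewrite author's own statement) =====
-- stated objective: simpler
-- what changed: Replaces the single fused four-level traversal that increments a shared counters dict with four independent per-level aggregations (len / sum of lens over flattened values), building the result dict once at the end.
import Mathlib
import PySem

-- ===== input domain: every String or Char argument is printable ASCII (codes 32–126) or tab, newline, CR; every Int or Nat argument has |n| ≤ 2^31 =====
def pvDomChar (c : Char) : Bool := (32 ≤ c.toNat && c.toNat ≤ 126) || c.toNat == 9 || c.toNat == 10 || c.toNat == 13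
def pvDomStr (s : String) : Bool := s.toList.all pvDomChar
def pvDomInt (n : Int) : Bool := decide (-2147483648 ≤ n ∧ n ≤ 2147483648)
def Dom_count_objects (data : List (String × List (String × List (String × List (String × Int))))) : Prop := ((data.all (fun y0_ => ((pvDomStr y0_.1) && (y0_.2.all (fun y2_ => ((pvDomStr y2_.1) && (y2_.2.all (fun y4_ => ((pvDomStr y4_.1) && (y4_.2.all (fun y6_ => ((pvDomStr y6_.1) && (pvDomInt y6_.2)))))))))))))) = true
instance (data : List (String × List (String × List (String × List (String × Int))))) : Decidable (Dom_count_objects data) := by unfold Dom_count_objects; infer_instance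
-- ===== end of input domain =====

-- B replaces A's single fused four-level counter-dict traversal with four independent
-- per-level aggregations (length / sums of lengths); objective: simpler.

-- ===== PORT A =====
def count_objects (data : List (String × List (String × List (String × List (String × Int))))) : List (String × Int) :=
  let counts : PySem.Dict String Int := PySem.Dict.ofList
    [("origin_chain_ids", 0), ("destination_chain_ids", 0), ("tickerhashes", 0),
     ("bins", 0), ("total_combinations", 0)]
  let counts := data.foldl (fun counts od =>
    let counts := counts.modify "origin_chain_ids" 0 (· + 1)
    od.2.foldl (fun counts dt =>
      let counts := counts.modify "destination_chain_ids" 0 (· + 1)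
      dt.2.foldl (fun counts tb =>
        let counts := counts.modify "tickerhashes" 0 (· + 1)
        tb.2.foldl (fun counts _ =>
          counts.modify "bins" 0 (· + 1)) counts) counts) counts) counts
  let counts := counts.insert "total_combinations" (counts.getD "tickerhashes" 0)
  counts.items

-- ===== PORT B =====
def count_objects_alt (data : List (String × List (String × List (String × List (String × Int))))) : List (String × Int) :=
  let origin : Int := data.length
  let destination : Int := (data.map (fun dest => (dest.2.length : Int))).sum
  let tickerhashes : Int := ((data.flatMap (fun dest => dest.2)).map (fun th => (th.2.length : Int))).sum
  let bins : Int := (((data.flatMap (fun dest => dest.2)).flatMap (fun th => th.2)).map (fun b => (b.2.length : Int))).sum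
  [("origin_chain_ids", origin), ("destination_chain_ids", destination),
   ("tickerhashes", tickerhashes), ("bins", bins), ("total_combinations", tickerhashes)]

-- ===== PRECONDITION & SPEC =====
def Spec_count_objects (data : List (String × List (String × List (String × List (String × Int))))) (out : List (String × Int)) : Prop := out = count_objects_alt data
instance (data : List (String × List (String × List (String × List (String × Int))))) (out : List (String × Int)) : Decidable (Spec_count_objects data out) := by unfold Spec_count_objects; infer_instance

-- ===== CLAIM (what is proved, stated in full; the proofs are below) =====
def Claim_equal_count_objects : Prop := ∀ (data : List (String × List (String × List (String × List (String × Int))))), Dom_count_objects data → Spec_count_objects data (count_objects data)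

-- ===== LEMMAS AND PROOFS =====

-- the counters dict during A's loop: total_combinations stays 0 until the final assignment
def pvD (a b c d : Int) : PySem.Dict String Int :=
  PySem.Dict.mk [("origin_chain_ids", a), ("destination_chain_ids", b), ("tickerhashes", c),
                 ("bins", d), ("total_combinations", 0)]

theorem pvD_congr {a b c d a' b' c' d' : Int} (h1 : a = a') (h2 : b = b')
    (h3 : c = c') (h4 : d = d') : pvD a b c d = pvD a' b' c' d' := by
  rw [h1, h2, h3, h4]

theorem pvD_modify_origin (a b c d : Int) :
    (pvD a b c d).modify "origin_chain_ids" 0 (· + 1) = pvD (a + 1) b c d := by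
  simp [pvD, PySem.Dict.modify, PySem.Dict.get?, PySem.Dict.insert, PySem.Dict.getD]

theorem pvD_modify_dest (a b c d : Int) :
    (pvD a b c d).modify "destination_chain_ids" 0 (· + 1) = pvD a (b + 1) c d := by
  simp [pvD, PySem.Dict.modify, PySem.Dict.get?, PySem.Dict.insert, PySem.Dict.getD]

theorem pvD_modify_ticker (a b c d : Int) :
    (pvD a b c d).modify "tickerhashes" 0 (· + 1) = pvD a b (c + 1) d := by
  simp [pvD, PySem.Dict.modify, PySem.Dict.get?, PySem.Dict.insert, PySem.Dict.getD]

theorem pvD_modify_bins (a b c d : Int) :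
    (pvD a b c d).modify "bins" 0 (· + 1) = pvD a b c (d + 1) := by
  simp [pvD, PySem.Dict.modify, PySem.Dict.get?, PySem.Dict.insert, PySem.Dict.getD]

theorem pv_fold_bins (l : List (String × Int)) (a b c d : Int) :
    l.foldl (fun counts _ => counts.modify "bins" 0 (· + 1)) (pvD a b c d)
      = pvD a b c (d + l.length) := by
  induction l generalizing d with
  | nil => simp [pvD]
  | cons x xs ih =>
      simp only [List.foldl_cons, pvD_modify_bins, ih, List.length_cons]
      apply pvD_congr <;> push_cast [List.flatMap_append, List.map_append, List.sum_append, List.map_cons, List.sum_cons] <;> ring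

theorem pv_fold_ticker (l : List (String × List (String × Int))) (a b c d : Int) :
    l.foldl (fun counts tb =>
        let counts := counts.modify "tickerhashes" 0 (· + 1)
        tb.2.foldl (fun counts _ => counts.modify "bins" 0 (· + 1)) counts) (pvD a b c d)
      = pvD a b (c + l.length) (d + (l.map (fun b => (b.2.length : Int))).sum) := by
  induction l generalizing c d with
  | nil => simp [pvD]
  | cons x xs ih =>
      simp only [List.foldl_cons, pvD_modify_ticker, pv_fold_bins, ih,
        List.length_cons, List.map_cons, List.sum_cons]
      apply pvD_congr <;> push_cast [List.flatMap_append, List.map_append, List.sum_append, List.map_cons, List.sum_cons] <;> ring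

theorem pv_fold_dest (l : List (String × List (String × List (String × Int)))) (a b c d : Int) :
    l.foldl (fun counts dt =>
        let counts := counts.modify "destination_chain_ids" 0 (· + 1)
        dt.2.foldl (fun counts tb =>
          let counts := counts.modify "tickerhashes" 0 (· + 1)
          tb.2.foldl (fun counts _ => counts.modify "bins" 0 (· + 1)) counts) counts) (pvD a b c d)
      = pvD a (b + l.length)
          (c + (l.map (fun dt => (dt.2.length : Int))).sum)
          (d + ((l.flatMap (fun dt => dt.2)).map (fun tb => (tb.2.length : Int))).sum) := by
  induction l generalizing b c d with
  | nil => simp [pvD]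
  | cons x xs ih =>
      simp only [List.foldl_cons, pvD_modify_dest, pv_fold_ticker, ih,
        List.length_cons, List.flatMap_cons, List.map_append, List.sum_append]
      apply pvD_congr <;> push_cast [List.flatMap_append, List.map_append, List.sum_append, List.map_cons, List.sum_cons] <;> ring

theorem pv_fold_top (l : List (String × List (String × List (String × List (String × Int))))) (a b c d : Int) :
    l.foldl (fun counts od =>
        let counts := counts.modify "origin_chain_ids" 0 (· + 1)
        od.2.foldl (fun counts dt =>
          let counts := counts.modify "destination_chain_ids" 0 (· + 1)
          dt.2.foldl (fun counts tb =>
            let counts := counts.modify "tickerhashes" 0 (· + 1)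
            tb.2.foldl (fun counts _ => counts.modify "bins" 0 (· + 1)) counts) counts) counts) (pvD a b c d)
      = pvD (a + l.length)
          (b + (l.map (fun dest => (dest.2.length : Int))).sum)
          (c + ((l.flatMap (fun od => od.2)).map (fun th => (th.2.length : Int))).sum)
          (d + (((l.flatMap (fun od => od.2)).flatMap (fun th => th.2)).map (fun x => (x.2.length : Int))).sum) := by
  induction l generalizing a b c d with
  | nil => simp [pvD]
  | cons x xs ih =>
      simp only [List.foldl_cons, pvD_modify_origin, pv_fold_dest, ih,
        List.length_cons, List.map_cons, List.sum_cons,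
        List.flatMap_cons, List.map_append, List.sum_append]
      apply pvD_congr <;> push_cast [List.flatMap_append, List.map_append, List.sum_append, List.map_cons, List.sum_cons] <;> ring

-- ===== VERDICT (by name: the statement is the Claim_ definition above) =====
theorem count_objects_spec : Claim_equal_count_objects := by
  intro data _
  show count_objects data = count_objects_alt data
  unfold count_objects count_objects_alt
  have h0 : PySem.Dict.ofList
      [("origin_chain_ids", (0 : Int)), ("destination_chain_ids", 0), ("tickerhashes", 0),
       ("bins", 0), ("total_combinations", 0)] = pvD 0 0 0 0 := by decide
  rw [h0]
  simp only [pv_fold_top]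
  simp [pvD, PySem.Dict.insert, PySem.Dict.getD, PySem.Dict.get?,
    PySem.Dict.contains]
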